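-- pv_equiv track=rewrite | github.com/movingcursor/clearway | singbox-profiles/render.py | _parse_wg_conf
-- ===== SOURCE A (Python) =====
-- def _parse_wg_conf(text):
--     """
--     Parse a standard WireGuard .conf file (INI format). Returns a dict:
--       {'interface': {k:v, ...}, 'peer': {k:v, ...}}
--     Keys preserve their original case so emitters can match WG conventions.
--     Supports a single [Interface] + single [Peer] section (the household
--     never has multi-peer home clients).
--     """
--     iface, peer = {}, {}
--     section = None
--     for raw in text.splitlines():
--         line = raw.split('#', 1)[0].strip()
--         if not line:
--             continue
--         if line.startswith('['):
--             section = line.strip('[]').strip().lower()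
--             continue
--         if '=' not in line:
--             continue
--         k, _, v = line.partition('=')
--         k, v = k.strip(), v.strip()
--         target = iface if section == 'interface' else peer if section == 'peer' else None
--         if target is None:
--             continue
--         target[k] = v
--     return {'interface': iface, 'peer': peer}
-- ===== SOURCE B (Python) =====
-- def _parse_kv_lines(lines):
--     d = {}
--     for line in lines:
--         if '=' in line:
--             k, _, v = line.partition('=')
--             d[k.strip()] = v.strip()
--     return d
--
--
-- def _parse_wg_conf(text):
--     # Phase 1: group cleaned lines into per-section buckets.
--     iface_lines, peer_lines = [], []
--     section = None
--     for raw in text.splitlines():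
--         line = raw.split('#', 1)[0].strip()
--         if not line:
--             continue
--         if line.startswith('['):
--             section = line.strip('[]').strip().lower()
--         elif section == 'interface':
--             iface_lines.append(line)
--         elif section == 'peer':
--             peer_lines.append(line)
--     # Phase 2: parse each bucket's k=v lines (last write wins).
--     return {'interface': _parse_kv_lines(iface_lines),
--             'peer': _parse_kv_lines(peer_lines)}
-- ===== Notes on version B (the rewrite author's own statement) =====
-- stated objective: alternative
-- what changed: B replaces A's single interleaved pass that builds both dicts while tracking the current section with a two-phase decomposition: a grouping pass that buckets cleaned lines per section, then a separate k=v parser applied to each bucket.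
import Mathlib
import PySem

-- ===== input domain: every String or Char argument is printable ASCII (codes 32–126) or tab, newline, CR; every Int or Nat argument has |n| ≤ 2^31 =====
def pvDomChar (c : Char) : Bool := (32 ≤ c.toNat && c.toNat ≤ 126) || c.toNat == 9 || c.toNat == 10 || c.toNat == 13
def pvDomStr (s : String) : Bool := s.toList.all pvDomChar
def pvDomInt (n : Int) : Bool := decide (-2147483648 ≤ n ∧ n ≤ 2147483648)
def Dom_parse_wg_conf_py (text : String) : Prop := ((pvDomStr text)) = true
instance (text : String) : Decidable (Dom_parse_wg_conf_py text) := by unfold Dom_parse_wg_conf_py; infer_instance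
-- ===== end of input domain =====

-- B regroups the work into two phases (bucket lines per section, then parse each bucket)
-- instead of A's single interleaved dict-building pass; objective: alternative decomposition.


-- ===== PORT A =====
-- shared by both ports because both Pythons contain the identical line
-- `line = raw.split('#', 1)[0].strip()` ([0] on a split result is always in range)
def pwClean (raw : String) : String :=
  PySem.Str.strip (((PySem.Str.splitMax? raw "#" 1).getD []).headD "")

-- `line.strip('[]').strip().lower()` (identical in both Pythons)
def pwHeader (line : String) : String :=
  PySem.Str.lower (PySem.Str.strip (PySem.Str.stripChars line "[]"))

-- `k, _, v = line.partition('=')` then strip: exact for lines containing '='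
-- (both ports only call it under that guard), where partition agrees with split('=', 1)
def pwKV (line : String) : String × String :=
  let parts := (PySem.Str.splitMax? line "=" 1).getD []
  (PySem.Str.strip (parts.headD ""), PySem.Str.strip ((parts.drop 1).headD ""))

-- one iteration of A's loop over (iface, peer, section)
def pwA_step (st : PySem.Dict String String × PySem.Dict String String × Option String)
    (raw : String) : PySem.Dict String String × PySem.Dict String String × Option String :=
  let line := pwClean raw
  if line = "" then st
  else if PySem.Str.startswith line "[" then (st.1, st.2.1, some (pwHeader line))
  else if PySem.Str.isIn "=" line = false then st
  else if st.2.2 = some "interface" then (st.1.insert (pwKV line).1 (pwKV line).2, st.2.1, st.2.2)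
  else if st.2.2 = some "peer" then (st.1, st.2.1.insert (pwKV line).1 (pwKV line).2, st.2.2)
  else st

def parse_wg_conf_py (text : String) : List (String × List (String × String)) :=
  let st := (PySem.Str.splitlines text).foldl pwA_step (PySem.Dict.empty, PySem.Dict.empty, none)
  [("interface", st.1.items), ("peer", st.2.1.items)]

-- ===== PORT B =====
-- phase 1: one iteration of the grouping loop over (iface_lines, peer_lines, section)
def pwB_group (st : List String × List String × Option String)
    (raw : String) : List String × List String × Option String :=
  let line := pwClean raw
  if line = "" then st
  else if PySem.Str.startswith line "[" then (st.1, st.2.1, some (pwHeader line))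
  else if st.2.2 = some "interface" then (st.1 ++ [line], st.2.1, st.2.2)
  else if st.2.2 = some "peer" then (st.1, st.2.1 ++ [line], st.2.2)
  else st

-- phase 2: `_parse_kv_lines` body for one line
def pwPStep (d : PySem.Dict String String) (line : String) : PySem.Dict String String :=
  if PySem.Str.isIn "=" line then d.insert (pwKV line).1 (pwKV line).2 else d

def pwB_parse (lines : List String) : PySem.Dict String String :=
  lines.foldl pwPStep PySem.Dict.empty

def parse_wg_conf_py_alt (text : String) : List (String × List (String × String)) :=
  let st := (PySem.Str.splitlines text).foldl pwB_group ([], [], none)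
  [("interface", (pwB_parse st.1).items), ("peer", (pwB_parse st.2.1).items)]

-- ===== PRECONDITION & SPEC =====
def Spec_parse_wg_conf_py (text : String) (out : List (String × List (String × String))) : Prop := out = parse_wg_conf_py_alt text
instance (text : String) (out : List (String × List (String × String))) : Decidable (Spec_parse_wg_conf_py text out) := by unfold Spec_parse_wg_conf_py; infer_instance

-- ===== CLAIM (what is proved, stated in full; the proofs are below) =====
def Claim_equal_parse_wg_conf_py : Prop := ∀ (text : String), Dom_parse_wg_conf_py text → Spec_parse_wg_conf_py text (parse_wg_conf_py text)

-- ===== LEMMAS AND PROOFS =====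

-- the grouping fold from non-empty buckets appends to them
theorem pwB_group_append (lines : List String) (bi bp : List String) (s : Option String) :
    lines.foldl pwB_group (bi, bp, s) =
      ((bi ++ (lines.foldl pwB_group ([], [], s)).1,
        bp ++ (lines.foldl pwB_group ([], [], s)).2.1,
        (lines.foldl pwB_group ([], [], s)).2.2)) := by
  induction lines generalizing bi bp s with
  | nil => simp
  | cons raw rest ih =>
    simp only [List.foldl_cons, pwB_group, List.nil_append]
    split_ifs with h1 h2 h3 h4
    . exact ih bi bp s
    . exact ih bi bp _
    . rw [ih (bi ++ [pwClean raw]) bp s, ih [pwClean raw] [] s]; simp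
    . rw [ih bi (bp ++ [pwClean raw]) s, ih [] [pwClean raw] s]; simp
    . exact ih bi bp s

-- main invariant: A's interleaved fold equals B's group-then-parse, from any state
theorem pwMain (lines : List String) (iface peer : PySem.Dict String String) (s : Option String) :
    lines.foldl pwA_step (iface, peer, s) =
      (((lines.foldl pwB_group ([], [], s)).1).foldl pwPStep iface,
       ((lines.foldl pwB_group ([], [], s)).2.1).foldl pwPStep peer,
       (lines.foldl pwB_group ([], [], s)).2.2) := by
  induction lines generalizing iface peer s with
  | nil => simp
  | cons raw rest ih =>
    simp only [List.foldl_cons, pwA_step, pwB_group, List.nil_append]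
    split_ifs with h1 h2 h3 h4 h5 h6 h7
    . exact ih iface peer s
    . exact ih iface peer _
    . -- no '=' in the line, section = interface: A skips it, B buckets it, pwPStep drops it
      rw [pwB_group_append rest [pwClean raw] [] s]
      simp only [PySem.Str.isIn_eq] at h3
      rw [show ("=" : String).toList = ['='] from rfl] at h3
      simp [ih, pwPStep, h3]
    . -- no '=' in the line, section = peer
      rw [pwB_group_append rest [] [pwClean raw] s]
      simp only [PySem.Str.isIn_eq] at h3
      rw [show ("=" : String).toList = ['='] from rfl] at h3
      simp [ih, pwPStep, h3]
    . exact ih iface peer s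
    . -- '=' present, section = interface
      rw [pwB_group_append rest [pwClean raw] [] s]
      simp only [PySem.Str.isIn_eq] at h3
      rw [show ("=" : String).toList = ['='] from rfl] at h3
      simp [ih, pwPStep, h3]
    . -- '=' present, section = peer
      rw [pwB_group_append rest [] [pwClean raw] s]
      simp only [PySem.Str.isIn_eq] at h3
      rw [show ("=" : String).toList = ['='] from rfl] at h3
      simp [ih, pwPStep, h3]
    . exact ih iface peer s

-- ===== VERDICT (by name: the statement is the Claim_ definition above) =====
theorem parse_wg_conf_py_spec : Claim_equal_parse_wg_conf_py := by
  intro text _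
  unfold Spec_parse_wg_conf_py parse_wg_conf_py parse_wg_conf_py_alt pwB_parse
  simp only [pwMain]
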